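-- pv_equiv track=rewrite | github.com/sciai-lab/DeconstruCTscans | deconstruct/utils/general.py | split_streak_string
-- ===== SOURCE A (Python) =====
-- def split_streak_string(streak_suffix):
--     streak_angles = []
--     current_part = ""
--     for char in streak_suffix:
--         if char in "xyz":
--             if current_part:
--                 streak_angles.append(current_part)
--             current_part = char
--         else:
--             current_part += char
--     if current_part:
--         streak_angles.append(current_part)
--     return streak_angles
-- ===== SOURCE B (Python) =====
-- import re
--
-- def split_streak_string(streak_suffix):
--     return [p for p in re.split(r'(?=[xyz])', streak_suffix) if p]
-- ===== Notes on version B (the rewrite author's own statement) =====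
-- stated objective: idiomatic
-- what changed: Replaces the manual per-char loop with accumulator by a single re.split on a zero-width lookahead before 'x'/'y'/'z', filtering out empty fragments.
import Mathlib
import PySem

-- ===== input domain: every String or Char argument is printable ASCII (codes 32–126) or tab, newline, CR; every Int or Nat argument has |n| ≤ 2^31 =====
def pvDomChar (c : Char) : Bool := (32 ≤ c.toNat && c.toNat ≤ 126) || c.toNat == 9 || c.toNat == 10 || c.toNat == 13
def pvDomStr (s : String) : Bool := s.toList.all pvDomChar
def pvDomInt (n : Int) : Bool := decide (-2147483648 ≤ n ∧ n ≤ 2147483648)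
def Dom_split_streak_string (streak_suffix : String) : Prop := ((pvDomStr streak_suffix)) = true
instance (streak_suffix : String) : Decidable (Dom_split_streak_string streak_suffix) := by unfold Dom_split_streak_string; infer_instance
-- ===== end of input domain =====

-- B replaces A's manual per-char loop with an idiomatic regex split on a zero-width
-- lookahead before 'x'/'y'/'z' (dropping empty fragments); equal return values on Dom.

-- char in "xyz"
def pvDelim (c : Char) : Bool := c = 'x' || c = 'y' || c = 'z'

-- ===== PORT A =====
-- the for-loop with state (streak_angles, current_part)
def pvLoopA : List String → List Char → List Char → List String
  | angles, cur, [] => if cur = [] then angles else angles ++ [String.mk cur]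
  | angles, cur, c :: rest =>
    if pvDelim c then
      pvLoopA (if cur = [] then angles else angles ++ [String.mk cur]) [c] rest
    else
      pvLoopA angles (cur ++ [c]) rest

def split_streak_string (streak_suffix : String) : List String :=
  pvLoopA [] [] streak_suffix.toList

-- ===== PORT B =====
-- Exact model of re.split(r'(?=[xyz])', s): the zero-width lookahead puts a split
-- point immediately before each 'x'/'y'/'z'; we realise those split points by
-- inserting a NUL marker (outside Dom's alphabet) before each delimiter and
-- splitting on it; the `if p` filter of Source B is the nonempty filter.
def pvMark : List Char → List Char
  | [] => []
  | c :: rest => if pvDelim c then Char.ofNat 0 :: c :: pvMark rest else c :: pvMark rest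

def split_streak_string_alt (streak_suffix : String) : List String :=
  ((((pvMark streak_suffix.toList).splitOn (Char.ofNat 0)).filter (fun p => p ≠ [])).map String.mk)

-- ===== PRECONDITION & SPEC =====
def Spec_split_streak_string (streak_suffix : String) (out : List String) : Prop := out = split_streak_string_alt streak_suffix
instance (streak_suffix : String) (out : List String) : Decidable (Spec_split_streak_string streak_suffix out) := by unfold Spec_split_streak_string; infer_instance

-- ===== CLAIM (what is proved, stated in full; the proofs are below) =====
def Claim_equal_split_streak_string : Prop := ∀ (streak_suffix : String), Dom_split_streak_string streak_suffix → Spec_split_streak_string streak_suffix (split_streak_string streak_suffix)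

-- ===== LEMMAS AND PROOFS =====

-- main invariant: A's loop from state (angles, cur) equals angles ++ B's pieces of cur ++ mark cs
theorem pvLoopA_eq (cs : List Char) : ∀ (angles : List String) (cur : List Char),
    (∀ c ∈ cs, c ≠ Char.ofNat 0) → (∀ c ∈ cur, c ≠ Char.ofNat 0) →
    pvLoopA angles cur cs =
      angles ++ ((((cur ++ pvMark cs).splitOn (Char.ofNat 0)).filter (fun p => p ≠ [])).map String.mk) := by
  induction cs with
  | nil =>
    intro angles cur _ hcur
    have hsingle : (cur ++ pvMark []).splitOn (Char.ofNat 0) = [cur] := by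
      simp only [pvMark, List.append_nil, List.splitOn]
      exact List.splitOnP_eq_single _ _ (by intro x hx; simpa using hcur x hx)
    rw [hsingle]
    by_cases hc : cur = [] <;> simp [pvLoopA, hc]
  | cons c rest ih =>
    intro angles cur hcs hcur
    have hcrest : ∀ x ∈ rest, x ≠ Char.ofNat 0 := fun x hx => hcs x (List.mem_cons_of_mem _ hx)
    have hc0 : c ≠ Char.ofNat 0 := hcs c List.mem_cons_self
    by_cases hd : pvDelim c
    · -- delimiter: mark inserts NUL; split cuts off cur
      have hsplit : (cur ++ pvMark (c :: rest)).splitOn (Char.ofNat 0)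
          = cur :: (c :: pvMark rest).splitOn (Char.ofNat 0) := by
        simp only [pvMark, hd, if_pos]
        exact List.splitOnP_first _ _ (by intro x hx; simpa using hcur x hx) _ (by simp) _
      have ihc := ih (if cur = [] then angles else angles ++ [String.mk cur]) [c] hcrest
        (by intro x hx; simp at hx; subst hx; exact hc0)
      simp only [pvLoopA, hd, if_pos]
      rw [ihc, hsplit]
      by_cases hc : cur = [] <;>
        simp [hc, List.filter]
    · -- non-delimiter: fold c into cur
      have ihc := ih angles (cur ++ [c]) hcrest
        (by intro x hx; rcases List.mem_append.mp hx with h | h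
            · exact hcur x h
            · simp at h; subst h; exact hc0)
      simp only [pvLoopA, hd, if_neg, Bool.false_eq_true, not_false_iff]
      rw [ihc]
      simp [pvMark, hd]

theorem dom_no_nul {s : String} (h : Dom_split_streak_string s) :
    ∀ c ∈ s.toList, c ≠ Char.ofNat 0 := by
  intro c hc hne
  have := List.all_eq_true.mp h c hc
  subst hne
  simp [pvDomChar, Char.toNat] at this

-- ===== VERDICT (by name: the statement is the Claim_ definition above) =====
theorem split_streak_string_spec : Claim_equal_split_streak_string := by
  intro s hdom
  unfold Spec_split_streak_string split_streak_string split_streak_string_alt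
  rw [pvLoopA_eq s.toList [] [] (dom_no_nul hdom) (by simp)]
  simp
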